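-- pv_equiv track=rewrite | github.com/PalRob/rdp | easy/dp_344_easy.py | have_odd_zeros
-- ===== SOURCE A (Python) =====
-- def have_odd_zeros(num):
--     """
--     Returns True if binary representation of a num contains block of
--     consecutive 0s of odd length. False otherwise."""
--     # [2:] to slice out starting 0b from a binary number
--     bin_num = bin(num)[2:]
--     odd_zeros = False
--     num_of_zeros = 0
--     for i in bin_num:
--         if i == '0':
--             num_of_zeros += 1
--         elif i == '1':
--             if num_of_zeros % 2 != 0:
--                 odd_zeros = True
--                 break
--             else:
--                 num_of_zeros = 0
--
--     else:
--         if num_of_zeros % 2 != 0: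
--             odd_zeros = True
--
--     return odd_zeros
-- ===== SOURCE B (Python) =====
-- def have_odd_zeros(num):
--     """
--     Returns True if binary representation of a num contains block of
--     consecutive 0s of odd length. False otherwise."""
--     # Split the binary digits on '1': the pieces are exactly the zero-runs
--     # (possibly empty).  abs() drops the sign, whose binary digits are the
--     # same and whose 'b'/'-' characters A's scanner ignores anyway.
--     runs = bin(abs(num))[2:].split('1')
--     return any(len(run) % 2 for run in runs)
-- ===== Notes on version B (the rewrite author's own statement) =====
-- stated objective: idiomatic
-- what changed: B splits the binary digit string on '1' to obtain the maximal zero-runs and tests their lengths with any(), replacing A's char-by-char state machine with counter, break and for-else.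
import Mathlib
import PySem

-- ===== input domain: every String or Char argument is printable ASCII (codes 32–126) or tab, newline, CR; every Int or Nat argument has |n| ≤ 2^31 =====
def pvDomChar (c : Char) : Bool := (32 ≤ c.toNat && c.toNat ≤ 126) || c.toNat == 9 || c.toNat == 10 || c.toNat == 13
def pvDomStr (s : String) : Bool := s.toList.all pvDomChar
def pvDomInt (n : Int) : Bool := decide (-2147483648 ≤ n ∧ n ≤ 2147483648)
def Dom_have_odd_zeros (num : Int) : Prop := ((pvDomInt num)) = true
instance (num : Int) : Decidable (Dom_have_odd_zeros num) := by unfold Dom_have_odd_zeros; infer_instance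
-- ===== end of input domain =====

-- B replaces A's char-by-char state machine by splitting the binary digit
-- string on '1' into the maximal zero-runs and testing their lengths (idiomatic).

-- Python's bin(n) digit part for n ≥ 0 (hand port of the builtin, exact:
-- bin(0) = '0b0', otherwise most-significant bit first).
def pyBinAux (n : Nat) : List Char :=
  if n = 0 then []
  else pyBinAux (n / 2) ++ [if n % 2 = 1 then '1' else '0']
decreasing_by exact Nat.div_lt_self (Nat.pos_of_ne_zero (by assumption)) (by norm_num)

def pyBinDigits (n : Nat) : List Char :=
  if n = 0 then ['0'] else pyBinAux n

-- ===== PORT A =====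
-- A's for-loop with break and for-else, as structural recursion over the chars;
-- the break returns True directly (odd_zeros is True exactly then).
def loopA : List Char → Bool → Nat → Bool
  | [], odd_zeros, num_of_zeros =>
      if num_of_zeros % 2 ≠ 0 then true else odd_zeros
  | c :: rest, odd_zeros, num_of_zeros =>
      if c = '0' then loopA rest odd_zeros (num_of_zeros + 1)
      else if c = '1' then
        (if num_of_zeros % 2 ≠ 0 then true else loopA rest odd_zeros 0)
      else loopA rest odd_zeros num_of_zeros

def have_odd_zeros (num : Int) : Bool :=
  -- bin(num)[2:] : for negative num this is 'b' ++ digits (the '-0' is sliced off)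
  let bin_num : List Char :=
    if num < 0 then 'b' :: pyBinDigits num.natAbs else pyBinDigits num.natAbs
  loopA bin_num false 0

-- ===== PORT B =====
-- str.split('1') on a list of chars (exact port of Python's split-with-separator).
def split1 : List Char → List (List Char)
  | [] => [[]]
  | c :: rest =>
      if c = '1' then [] :: split1 rest
      else
        match split1 rest with
        | r :: rs => (c :: r) :: rs
        | [] => [[c]]

def have_odd_zeros_alt (num : Int) : Bool :=
  (split1 (pyBinDigits num.natAbs)).any (fun run => run.length % 2 == 1)

-- ===== PRECONDITION & SPEC =====
def Spec_have_odd_zeros (num : Int) (out : Bool) : Prop := out = have_odd_zeros_alt num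
instance (num : Int) (out : Bool) : Decidable (Spec_have_odd_zeros num out) := by unfold Spec_have_odd_zeros; infer_instance

-- ===== CLAIM (what is proved, stated in full; the proofs are below) =====
def Claim_equal_have_odd_zeros : Prop := ∀ (num : Int), Dom_have_odd_zeros num → Spec_have_odd_zeros num (have_odd_zeros num)

-- ===== LEMMAS AND PROOFS =====

theorem split1_ne_nil (l : List Char) : split1 l ≠ [] := by
  cases l with
  | nil => simp [split1]
  | cons c rest =>
      simp only [split1]
      split
      · simp
      · cases h : split1 rest <;> simp

theorem binary_pyBinAux : ∀ n : Nat, ∀ c ∈ pyBinAux n, c = '0' ∨ c = '1' := by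
  intro n
  induction n using Nat.strong_induction_on with
  | _ n ih =>
      intro c hc
      rw [pyBinAux] at hc
      split at hc
      · simp at hc
      · rename_i hn
        rcases List.mem_append.1 hc with h | h
        · exact ih (n / 2) (Nat.div_lt_self (Nat.pos_of_ne_zero hn) (by norm_num)) c h
        · simp at h
          subst h
          split <;> simp

theorem binary_pyBinDigits : ∀ n : Nat, ∀ c ∈ pyBinDigits n, c = '0' ∨ c = '1' := by
  intro n c hc
  rw [pyBinDigits] at hc
  split at hc
  · simp at hc; subst hc; left; rfl
  · exact binary_pyBinAux n c hc

theorem key : ∀ (l : List Char), (∀ c ∈ l, c = '0' ∨ c = '1') → ∀ (z : Nat) (r : List Char) (rs : List (List Char)),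
    split1 l = r :: rs →
    loopA l false z = (((z + r.length) % 2 == 1) || rs.any (fun t => t.length % 2 == 1)) := by
  intro l
  induction l with
  | nil =>
      intro _ z r rs hsplit
      simp [split1] at hsplit
      obtain ⟨hr, hrs⟩ := hsplit
      subst hr; subst hrs
      simp only [loopA, List.length_nil, Nat.add_zero, List.any_nil, Bool.or_false]
      by_cases hz : z % 2 ≠ 0
      · rw [if_pos hz]; simp; omega
      · rw [if_neg hz]; simp; omega
  | cons c rest ih =>
      intro hbin z r rs hsplit
      have hrest : ∀ c ∈ rest, c = '0' ∨ c = '1' := fun c hc => hbin c (List.mem_cons_of_mem _ hc)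
      rcases hbin c (List.mem_cons_self ..) with h0 | h1
      · -- c = '0'
        subst h0
        have h01 : ('0' : Char) ≠ '1' := by decide
        simp only [split1, if_neg h01] at hsplit
        cases hs : split1 rest with
        | nil => exact absurd hs (split1_ne_nil rest)
        | cons r' rs' =>
            rw [hs] at hsplit
            simp at hsplit
            obtain ⟨hr, hrs⟩ := hsplit
            subst hr; subst hrs
            simp only [loopA]
            rw [ih hrest (z + 1) r' rs' hs]
            have : (z + 1 + r'.length) = (z + ('0' :: r').length) := by simp; omega
            rw [this]
            simp
      · -- c = '1'
        subst h1
        simp only [split1, if_pos] at hsplit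
        simp at hsplit
        obtain ⟨hr, hrs⟩ := hsplit
        subst hr
        cases hs : split1 rest with
        | nil => exact absurd hs (split1_ne_nil rest)
        | cons r' rs' =>
            rw [hs] at hrs
            subst hrs
            have h10 : ('1' : Char) ≠ '0' := by decide
            simp only [loopA, if_neg h10]
            rw [ih hrest 0 r' rs' hs]
            simp only [List.length_nil, Nat.add_zero, List.any_cons]
            by_cases hz : z % 2 ≠ 0
            · rw [if_pos hz]
              have : (z % 2 == 1) = true := by simp; omega
              rw [this]; simp
            · rw [if_neg hz]
              have : (z % 2 == 1) = false := by simp; omega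
              rw [this]; simp

-- ===== VERDICT (by name: the statement is the Claim_ definition above) =====
theorem have_odd_zeros_spec : Claim_equal_have_odd_zeros := by
  unfold Claim_equal_have_odd_zeros
  intro num _
  unfold Spec_have_odd_zeros have_odd_zeros have_odd_zeros_alt
  have hbin := binary_pyBinDigits num.natAbs
  cases hs : split1 (pyBinDigits num.natAbs) with
  | nil => exact absurd hs (split1_ne_nil _)
  | cons r rs =>
      have hk := key (pyBinDigits num.natAbs) hbin 0 r rs hs
      simp only [Nat.zero_add] at hk
      have hskip : loopA ('b' :: pyBinDigits num.natAbs) false 0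
          = loopA (pyBinDigits num.natAbs) false 0 := by
        simp [loopA]
      split <;> simp only [hskip, hk, List.any_cons]
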